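-- pv_equiv track=rewrite | github.com/BlueBrain/nmodl | nmodl/ode.py | make_unique_prefix
-- ===== SOURCE A (Python) =====
-- def make_unique_prefix(vars, default_prefix="tmp"):
--     prefix = default_prefix
--     # generate prefix that doesn't match first part
--     # of any string in vars
--     while True:
--         for v in vars:
--             # if v is long enough to match prefix
--             # and first part of it matches prefix
--             if ((len(v) >= len(prefix)) and (v[: len(prefix)] == prefix)):
--                 # append undescore to prefix, try again
--                 prefix += "_"
--                 break
--         else:
--             # for loop ended without finding possible clash
--             return prefix
-- ===== SOURCE B (Python) =====
-- def make_unique_prefix(variables, default_prefix="tmp"):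
--     # single pass: longest run of underscores following default_prefix among
--     # vars that start with it; answer is default_prefix plus one more underscore
--     best = -1
--     n = len(default_prefix)
--     for v in variables:
--         if v.startswith(default_prefix):
--             rest = v[n:]
--             k = 0
--             while k < len(rest) and rest[k] == "_":
--                 k += 1
--             if k > best:
--                 best = k
--     return default_prefix + "_" * (best + 1)
-- ===== Notes on version B (the rewrite author's own statement) =====
-- stated objective: alternative
-- what changed: Replaces the retry loop (re-scanning all vars for each candidate prefix) by a single pass that takes the maximal underscore run following default_prefix among vars starting with it, returning default_prefix plus one more underscore.
import Mathlib
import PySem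

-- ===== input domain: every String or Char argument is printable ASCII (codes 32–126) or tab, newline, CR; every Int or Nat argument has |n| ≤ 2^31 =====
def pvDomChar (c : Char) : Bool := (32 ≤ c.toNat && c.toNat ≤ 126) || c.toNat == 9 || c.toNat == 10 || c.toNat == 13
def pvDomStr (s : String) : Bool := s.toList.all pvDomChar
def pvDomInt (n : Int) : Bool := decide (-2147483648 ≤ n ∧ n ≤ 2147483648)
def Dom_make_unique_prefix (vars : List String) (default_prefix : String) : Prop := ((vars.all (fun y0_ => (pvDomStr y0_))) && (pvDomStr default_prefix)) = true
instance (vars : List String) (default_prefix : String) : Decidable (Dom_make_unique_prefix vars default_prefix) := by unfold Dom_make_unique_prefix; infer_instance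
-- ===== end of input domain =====

-- B replaces A's retry loop by one pass over vars (maximal underscore run after
-- default_prefix, plus one more underscore).

-- ===== PORT A =====
-- max length of any var; bounds the growth of the prefix (used only for termination)
def pvMaxLen (vs : List (List Char)) : Nat := vs.foldr (fun v m => max v.length m) 0

theorem pvMaxLen_ge {vs : List (List Char)} {v : List Char} (h : v ∈ vs) :
    v.length ≤ pvMaxLen vs := by
  induction vs with
  | nil => cases h
  | cons a t ih =>
    cases h with
    | head => exact le_max_left _ _
    | tail _ h => exact le_trans (ih h) (le_max_right _ _)

-- the while-True loop of A: if some var clashes with the prefix, append '_' and retry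
def pvLoopA (vs : List (List Char)) (p : List Char) : List Char :=
  if h : vs.any (fun v => decide (p.length ≤ v.length) && decide (v.take p.length = p)) = true then
    pvLoopA vs (p ++ ['_'])
  else
    p
termination_by pvMaxLen vs + 1 - p.length
decreasing_by
  simp only [List.any_eq_true, Bool.and_eq_true, decide_eq_true_eq] at h
  obtain ⟨v, hv, hlen, _⟩ := h
  have := pvMaxLen_ge hv
  simp only [List.length_append, List.length_singleton]
  omega

def make_unique_prefix (vars : List String) (default_prefix : String) : String :=
  String.ofList (pvLoopA (vars.map String.toList) default_prefix.toList)

-- ===== PORT B =====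
-- number of leading underscores (Source B's inner while loop)
def pvLeadU : List Char → Nat
  | [] => 0
  | c :: t => if c = '_' then pvLeadU t + 1 else 0

def make_unique_prefix_alt (vars : List String) (default_prefix : String) : String :=
  let d := default_prefix.toList
  let best : Int := vars.foldl
    (fun b v =>
      let cs := v.toList
      if d.isPrefixOf cs then max b ((pvLeadU (cs.drop d.length) : Int)) else b)
    (-1)
  String.ofList (d ++ List.replicate (best + 1).toNat '_')

-- ===== PRECONDITION & SPEC =====
def Spec_make_unique_prefix (vars : List String) (default_prefix : String) (out : String) : Prop := out = make_unique_prefix_alt vars default_prefix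
instance (vars : List String) (default_prefix : String) (out : String) : Decidable (Spec_make_unique_prefix vars default_prefix out) := by unfold Spec_make_unique_prefix; infer_instance

-- ===== CLAIM (what is proved, stated in full; the proofs are below) =====
def Claim_equal_make_unique_prefix : Prop := ∀ (vars : List String) (default_prefix : String), Dom_make_unique_prefix vars default_prefix → Spec_make_unique_prefix vars default_prefix (make_unique_prefix vars default_prefix)

-- ===== LEMMAS AND PROOFS =====

-- B's fold, as a standalone function of the char-list vars
def pvBest (vs : List (List Char)) (d : List Char) (b : Int) : Int :=
  vs.foldl (fun b v => if d.isPrefixOf v then max b ((pvLeadU (v.drop d.length) : Int)) else b) b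

-- replicate j '_' is a prefix of cs iff j ≤ pvLeadU cs
theorem replicate_prefix_iff (j : Nat) (cs : List Char) :
    List.replicate j '_' <+: cs ↔ j ≤ pvLeadU cs := by
  induction j generalizing cs with
  | zero => simp
  | succ n ih =>
    cases cs with
    | nil => simp [List.replicate_succ, pvLeadU]
    | cons c t =>
      rw [List.replicate_succ]
      constructor
      · rintro ⟨s, hs⟩
        cases hs
        have := (ih (List.replicate n '_' ++ s)).mp ⟨s, rfl⟩
        simp [pvLeadU]
        omega
      · intro h
        simp only [pvLeadU] at h
        by_cases hc : c = '_'
        · rw [if_pos hc] at h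
          subst hc
          rw [List.cons_prefix_cons]
          exact ⟨rfl, (ih t).mpr (by omega)⟩
        · rw [if_neg hc] at h
          omega
  
-- j ≤ pvBest vs d b iff j ≤ b or some var witnesses it  (j : Int)
theorem le_pvBest_iff (vs : List (List Char)) (d : List Char) (b j : Int) :
    j ≤ pvBest vs d b ↔ j ≤ b ∨ ∃ v ∈ vs, d.isPrefixOf v ∧ j ≤ (pvLeadU (v.drop d.length) : Int) := by
  induction vs generalizing b with
  | nil => simp [pvBest]
  | cons v t ih =>
    simp only [pvBest, List.foldl_cons] at *
    by_cases h : d.isPrefixOf v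
    · rw [if_pos h, ih]
      simp only [List.mem_cons]
      constructor
      · rintro (hb | hw)
        · rcases le_max_iff.mp hb with hb | hb
          · exact Or.inl hb
          · exact Or.inr ⟨v, Or.inl rfl, h, hb⟩
        · obtain ⟨w, hw, hp, hj⟩ := hw
          exact Or.inr ⟨w, Or.inr hw, hp, hj⟩
      · rintro (hb | ⟨w, (rfl | hw), hp, hj⟩)
        · exact Or.inl (le_max_iff.mpr (Or.inl hb))
        · exact Or.inl (le_max_iff.mpr (Or.inr hj))
        · exact Or.inr ⟨w, hw, hp, hj⟩
    · rw [if_neg h, ih]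
      simp only [List.mem_cons]
      constructor
      · rintro (hb | ⟨w, hw, hp, hj⟩)
        · exact Or.inl hb
        · exact Or.inr ⟨w, Or.inr hw, hp, hj⟩
      · rintro (hb | ⟨w, (rfl | hw), hp, hj⟩)
        · exact Or.inl hb
        · exact absurd hp h
        · exact Or.inr ⟨w, hw, hp, hj⟩

theorem neg_one_le_pvBest (vs : List (List Char)) (d : List Char) :
    (-1 : Int) ≤ pvBest vs d (-1) := (le_pvBest_iff vs d (-1) (-1)).mpr (Or.inl le_rfl)

-- A's clash test on the candidate d ++ '_'*j, characterised through pvBest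
theorem clash_iff (vs : List (List Char)) (d : List Char) (j : Nat) :
    (vs.any (fun v => decide ((d ++ List.replicate j '_').length ≤ v.length) &&
        decide (v.take (d ++ List.replicate j '_').length = d ++ List.replicate j '_')) = true)
      ↔ (j : Int) ≤ pvBest vs d (-1) := by
  rw [le_pvBest_iff]
  simp only [List.any_eq_true, Bool.and_eq_true, decide_eq_true_eq]
  constructor
  · rintro ⟨v, hv, hlen, htake⟩
    have hpre : d ++ List.replicate j '_' <+: v := by
      rw [List.prefix_iff_eq_take]
      exact htake.symm
    have hd : d <+: v := (List.prefix_append d (List.replicate j '_')).trans hpre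
    refine Or.inr ⟨v, hv, List.isPrefixOf_iff_prefix.mpr hd, ?_⟩
    have hrest : List.replicate j '_' <+: v.drop d.length := by
      obtain ⟨s, hs⟩ := hpre
      refine ⟨s, ?_⟩
      rw [← hs, List.append_assoc, List.drop_left]
    exact_mod_cast (replicate_prefix_iff j _).mp hrest
  · rintro (hb | ⟨v, hv, hp, hj⟩)
    · omega
    · have hd : d <+: v := List.isPrefixOf_iff_prefix.mp hp
      have hj' : j ≤ pvLeadU (v.drop d.length) := by exact_mod_cast hj
      have hrest := (replicate_prefix_iff j _).mpr hj'
      have hpre : d ++ List.replicate j '_' <+: v := by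
        obtain ⟨s, hs⟩ := hrest
        obtain ⟨t, ht⟩ := hd
        refine ⟨s, ?_⟩
        rw [List.append_assoc, hs]
        conv_rhs => rw [← ht]
        congr 1
        rw [← ht, List.drop_left]
      refine ⟨v, hv, hpre.length_le, (List.prefix_iff_eq_take.mp hpre).symm⟩

-- main invariant for A's loop
theorem pvLoopA_eq (vs : List (List Char)) (d : List Char) (j : Nat)
    (h : (j : Int) ≤ pvBest vs d (-1) + 1) :
    pvLoopA vs (d ++ List.replicate j '_') =
      d ++ List.replicate (pvBest vs d (-1) + 1).toNat '_' := by
  rw [pvLoopA]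
  by_cases hc : (vs.any (fun v => decide ((d ++ List.replicate j '_').length ≤ v.length) &&
      decide (v.take (d ++ List.replicate j '_').length = d ++ List.replicate j '_')) = true)
  · rw [dif_pos hc]
    have hj := (clash_iff vs d j).mp hc
    have : d ++ List.replicate j '_' ++ ['_'] = d ++ List.replicate (j + 1) '_' := by
      rw [List.append_assoc, List.replicate_succ' (n := j)]
    rw [this]
    exact pvLoopA_eq vs d (j + 1) (by omega)
  · rw [dif_neg hc]
    have hj : pvBest vs d (-1) < (j : Int) := not_le.mp ((clash_iff vs d j).not.mp hc)
    have hn : (pvBest vs d (-1) + 1).toNat = j := by omega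
    rw [hn]
termination_by (pvMaxLen vs + 1 - (d ++ List.replicate j '_').length)
decreasing_by
  simp only [List.any_eq_true, Bool.and_eq_true, decide_eq_true_eq] at hc
  obtain ⟨v, hv, hlen, _⟩ := hc
  have := pvMaxLen_ge hv
  simp only [List.length_append, List.length_replicate] at *
  omega

-- ===== VERDICT (by name: the statement is the Claim_ definition above) =====
theorem make_unique_prefix_spec : Claim_equal_make_unique_prefix := by
  intro vars dp _
  unfold Spec_make_unique_prefix make_unique_prefix make_unique_prefix_alt
  have h0 := pvLoopA_eq (vars.map String.toList) dp.toList 0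
    (by have := neg_one_le_pvBest (vars.map String.toList) dp.toList; omega)
  simp only [List.replicate_zero, List.append_nil] at h0
  rw [h0]
  congr 2
  · unfold pvBest
    rw [List.foldl_map]
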